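-- pv_equiv track=rewrite | github.com/freddyvelarde/umsa-code | python/lotes/i.py | indentNumber
-- ===== SOURCE A (Python) =====
-- def indentNumber(num):
--     current_lower = num
--     while current_lower % 5 != 0:
--         current_lower -= 1
--
--     current_greater = num
--     while current_greater % 5 != 0:
--         current_greater += 1
--
--     return {"lower": current_lower, "greater": current_greater }
-- ===== SOURCE B (Python) =====
-- def indentNumber(num):
--     r = num % 5
--     return {"lower": num - r, "greater": num + (5 - r) % 5}
-- ===== Notes on version B (the rewrite author's own statement) =====
-- stated objective: simpler
-- what changed: Replaces both while-loops with a closed-form modular-arithmetic computation of the nearest multiples of 5.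
import Mathlib
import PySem

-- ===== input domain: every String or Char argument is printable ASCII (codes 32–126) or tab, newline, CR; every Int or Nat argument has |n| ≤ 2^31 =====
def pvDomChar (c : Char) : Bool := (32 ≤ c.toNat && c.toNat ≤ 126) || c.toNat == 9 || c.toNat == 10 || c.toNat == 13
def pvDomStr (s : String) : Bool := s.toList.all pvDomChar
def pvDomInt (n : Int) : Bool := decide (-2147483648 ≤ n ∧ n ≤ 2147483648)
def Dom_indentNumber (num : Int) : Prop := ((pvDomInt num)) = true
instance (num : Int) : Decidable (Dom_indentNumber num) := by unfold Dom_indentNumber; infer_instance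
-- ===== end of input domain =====

-- B replaces A's two while-loops by a closed-form modular-arithmetic expression; return value only.

-- ===== PORT A =====
-- 'while current_lower % 5 != 0: current_lower -= 1'
def lowerLoop (c : Int) : Int :=
  if PySem.Int.mod c 5 ≠ 0 then lowerLoop (c - 1) else c
termination_by (PySem.Int.mod c 5).toNat
decreasing_by
  have e : ∀ a : Int, PySem.Int.mod a 5 = a % 5 := fun a => PySem.Int.mod_eq_emod_of_pos (by omega)
  simp only [e] at *
  omega

-- 'while current_greater % 5 != 0: current_greater += 1'
def greaterLoop (c : Int) : Int :=
  if PySem.Int.mod c 5 ≠ 0 then greaterLoop (c + 1) else c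
termination_by (PySem.Int.mod (-c) 5).toNat
decreasing_by
  have e : ∀ a : Int, PySem.Int.mod a 5 = a % 5 := fun a => PySem.Int.mod_eq_emod_of_pos (by omega)
  simp only [e] at *
  omega

def indentNumber (num : Int) : List (String × Int) :=
  [("lower", lowerLoop num), ("greater", greaterLoop num)]

-- ===== PORT B =====
def indentNumber_alt (num : Int) : List (String × Int) :=
  let r := PySem.Int.mod num 5
  [("lower", num - r), ("greater", num + PySem.Int.mod (5 - r) 5)]

-- ===== PRECONDITION & SPEC =====
def Spec_indentNumber (num : Int) (out : List (String × Int)) : Prop := out = indentNumber_alt num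
instance (num : Int) (out : List (String × Int)) : Decidable (Spec_indentNumber num out) := by unfold Spec_indentNumber; infer_instance

-- ===== CLAIM (what is proved, stated in full; the proofs are below) =====
def Claim_equal_indentNumber : Prop := ∀ (num : Int), Dom_indentNumber num → Spec_indentNumber num (indentNumber num)

-- ===== LEMMAS AND PROOFS =====
theorem lowerLoop_eq_aux (k : Nat) : ∀ c : Int, (c % 5).toNat = k → lowerLoop c = c - c % 5 := by
  induction k with
  | zero =>
    intro c hk
    have h1 : 0 ≤ c % 5 := Int.emod_nonneg c (by omega)
    have h0 : c % 5 = 0 := by omega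
    rw [lowerLoop.eq_def, if_neg]
    · omega
    · simp [h0]
  | succ k ih =>
    intro c hk
    have h1 : 0 ≤ c % 5 := Int.emod_nonneg c (by omega)
    have h2 : c % 5 < 5 := Int.emod_lt_of_pos c (by omega)
    have hne : c % 5 ≠ 0 := by omega
    rw [lowerLoop.eq_def, if_pos]
    · have hrec := ih (c - 1) (by omega)
      rw [hrec]; omega
    · rw [PySem.Int.mod_eq_emod_of_pos (by omega)]; exact hne

theorem lowerLoop_eq (c : Int) : lowerLoop c = c - c % 5 :=
  lowerLoop_eq_aux _ c rfl

theorem greaterLoop_eq_aux (k : Nat) : ∀ c : Int, ((-c) % 5).toNat = k → greaterLoop c = c + (5 - c % 5) % 5 := by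
  induction k with
  | zero =>
    intro c hk
    have h1 : 0 ≤ (-c) % 5 := Int.emod_nonneg _ (by omega)
    have h0 : c % 5 = 0 := by omega
    rw [greaterLoop.eq_def, if_neg]
    · omega
    · simp [h0]
  | succ k ih =>
    intro c hk
    have h1 : 0 ≤ c % 5 := Int.emod_nonneg c (by omega)
    have h2 : c % 5 < 5 := Int.emod_lt_of_pos c (by omega)
    have hne : c % 5 ≠ 0 := by omega
    rw [greaterLoop.eq_def, if_pos]
    · have hrec := ih (c + 1) (by omega)
      rw [hrec]; omega
    · rw [PySem.Int.mod_eq_emod_of_pos (by omega)]; exact hne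

theorem greaterLoop_eq (c : Int) : greaterLoop c = c + (5 - c % 5) % 5 :=
  greaterLoop_eq_aux _ c rfl

-- ===== VERDICT (by name: the statement is the Claim_ definition above) =====
theorem indentNumber_spec : Claim_equal_indentNumber := by
  intro num _
  unfold Spec_indentNumber indentNumber indentNumber_alt
  have e1 : PySem.Int.mod num 5 = num % 5 := PySem.Int.mod_eq_emod_of_pos (by omega)
  have e2 : PySem.Int.mod (5 - num % 5) 5 = (5 - num % 5) % 5 := PySem.Int.mod_eq_emod_of_pos (by omega)
  rw [lowerLoop_eq, greaterLoop_eq]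
  simp only [e1, e2]
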